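-- pv_equiv track=rewrite | github.com/DOUDOUUUUUUUU/L3Info | Python/A3/ex1/main.py | full_name
-- ===== SOURCE A (Python) =====
-- def full_name(arg:str)->str:
--     try:
--         new_arg = ""
--         i = 0
--         while arg[i] != " ":
--             new_arg += arg[i].upper()
--             i += 1
--         new_arg += arg[i:]
--         return new_arg
--     except:
--         raise NameError
-- ===== SOURCE B (Python) =====
-- def full_name(arg: str) -> str:
--     try:
--         i = arg.index(" ")
--         return arg[:i].upper() + arg[i:]
--     except:
--         raise NameError
-- ===== Notes on version B (the rewrite author's own statement) =====
-- stated objective: simpler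
-- what changed: Replaces the character-by-character while loop (indexing, per-char upper, string accumulation) with a locate-then-slice two-step: find the first space with str.index, then uppercase the prefix slice in one call and concatenate the rest.
import Mathlib
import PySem

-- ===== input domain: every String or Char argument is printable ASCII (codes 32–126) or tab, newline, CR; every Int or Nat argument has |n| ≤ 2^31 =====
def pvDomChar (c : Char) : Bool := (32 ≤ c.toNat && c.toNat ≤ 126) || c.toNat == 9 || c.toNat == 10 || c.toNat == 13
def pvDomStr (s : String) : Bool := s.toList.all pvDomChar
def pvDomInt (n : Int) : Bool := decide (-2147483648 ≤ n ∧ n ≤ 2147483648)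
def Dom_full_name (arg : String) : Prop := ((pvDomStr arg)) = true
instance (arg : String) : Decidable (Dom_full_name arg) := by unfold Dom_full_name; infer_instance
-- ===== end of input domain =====

-- B replaces A's per-character scan-and-accumulate loop with locate-the-space-then-slice
-- (index, upper the prefix slice, concatenate the rest); objective: simpler.

-- ===== PORT A =====
-- A's while loop: scan characters until a space, accumulating uppercased chars;
-- on hitting the space append the remaining suffix arg[i:] (which starts with the space).
-- The [] case is where Python's arg[i] raises IndexError (→ NameError): outside Pre_.
def fnAgo : List Char → List Char → List Char
  | acc, [] => acc
  | acc, c :: rest =>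
      if c = ' ' then acc ++ (c :: rest)
      else fnAgo (acc ++ [PySem.Chars.upperChar c]) rest

def full_name (arg : String) : String := String.ofList (fnAgo [] arg.toList)

-- ===== PORT B =====
-- i = arg.index(" "); return arg[:i].upper() + arg[i:]  (Pre_ guarantees the space exists,
-- so index = find; in Python both versions raise NameError when there is no space).
def full_name_alt (arg : String) : String :=
  let i : Int := PySem.Str.find arg " "
  PySem.Str.upper (PySem.Str.slice arg none (some i)) ++ PySem.Str.slice arg (some i) none

-- ===== PRECONDITION & SPEC =====
-- A raises NameError (via IndexError) exactly when arg contains no space; those inputs are excluded.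
def Pre_full_name (arg : String) : Prop := PySem.Str.isIn " " arg = true
instance (arg : String) : Decidable (Pre_full_name arg) := by unfold Pre_full_name; infer_instance

def pvWitness_full_name : String := "john smith"

def Spec_full_name (arg : String) (out : String) : Prop := out = full_name_alt arg
instance (arg : String) (out : String) : Decidable (Spec_full_name arg out) := by unfold Spec_full_name; infer_instance

-- ===== CLAIM (what is proved, stated in full; the proofs are below) =====
def Claim_equal_full_name : Prop := ∀ (arg : String), Dom_full_name arg → Pre_full_name arg → Spec_full_name arg (full_name arg)

-- ===== LEMMAS AND PROOFS =====

-- A's loop computes: uppercased takeWhile (≠ ' ') followed by the dropWhile suffix.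
theorem fnAgo_eq (cs acc : List Char) (h : ' ' ∈ cs) :
    fnAgo acc cs = acc ++ (cs.takeWhile (fun c => c != ' ')).map PySem.Chars.upperChar
      ++ cs.dropWhile (fun c => c != ' ') := by
  induction cs generalizing acc with
  | nil => cases h
  | cons c rest ih =>
    by_cases hc : c = ' '
    · subst hc
      rw [List.takeWhile_cons, if_neg (by simp), List.dropWhile_cons, if_neg (by simp)]
      simp [fnAgo]
    · have hmem : ' ' ∈ rest := by
        cases h with
        | head => exact absurd rfl hc
        | tail _ h' => exact h'
      rw [List.takeWhile_cons, if_pos (by simp [hc]), List.dropWhile_cons, if_pos (by simp [hc])]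
      simp only [fnAgo, if_neg hc]
      rw [ih _ hmem]
      simp

-- the first space sits right after takeWhile (≠ ' ')
theorem getElem?_at_takeWhile_len (cs : List Char) (h : ' ' ∈ cs) :
    cs[(cs.takeWhile (fun c => c != ' ')).length]? = some ' ' := by
  induction cs with
  | nil => cases h
  | cons c rest ih =>
    by_cases hc : c = ' '
    · subst hc
      rw [List.takeWhile_cons, if_neg (by simp)]
      simp
    · have hmem : ' ' ∈ rest := by
        cases h with
        | head => exact absurd rfl hc
        | tail _ h' => exact h'
      rw [List.takeWhile_cons, if_pos (by simp [hc])]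
      simpa using ih hmem

theorem getElem?_lt_takeWhile_len (cs : List Char) (i : Nat)
    (hi : i < (cs.takeWhile (fun c => c != ' ')).length) : cs[i]? ≠ some ' ' := by
  induction cs generalizing i with
  | nil => simp at hi
  | cons c rest ih =>
    by_cases hc : c = ' '
    · subst hc
      rw [List.takeWhile_cons, if_neg (by simp)] at hi
      simp at hi
    · rw [List.takeWhile_cons, if_pos (by simp [hc])] at hi
      rw [List.length_cons] at hi
      cases i with
      | zero => simpa using hc
      | succ j =>
        simp only [List.getElem?_cons_succ]
        exact ih j (by omega)

theorem singleton_prefix_drop {cs : List Char} {k : Nat} :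
    [' '] <+: cs.drop k ↔ cs[k]? = some ' ' := by
  constructor
  · rintro ⟨t, ht⟩
    have : (cs.drop k).head? = some ' ' := by rw [← ht]; rfl
    simpa [List.head?_drop] using this
  · intro h
    have : (cs.drop k).head? = some ' ' := by simpa [List.head?_drop] using h
    cases hd : cs.drop k with
    | nil => simp [hd] at this
    | cons x xs =>
      rw [hd] at this
      simp only [List.head?_cons, Option.some.injEq] at this
      exact ⟨xs, by simp [this]⟩

-- Chars.find of " " lands exactly on the takeWhile boundary
theorem find_space (cs : List Char) (h : ' ' ∈ cs) :
    PySem.Chars.find cs [' '] = ((cs.takeWhile (fun c => c != ' ')).length : Int) := by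
  have hinf : [' '] <:+: cs := by
    obtain ⟨pre, suf, hps⟩ := List.append_of_mem h
    exact ⟨pre, suf, by simp [hps]⟩
  have hnn : 0 ≤ PySem.Chars.find cs [' '] := (PySem.Chars.find_nonneg_iff _ _).mpr hinf
  obtain ⟨hpre, hmin⟩ := PySem.Chars.find_spec hnn
  set k := (PySem.Chars.find cs [' ']).toNat with hk
  set t := (cs.takeWhile (fun c => c != ' ')).length with ht
  have hkt : k = t := by
    rcases Nat.lt_trichotomy k t with hlt | heq | hgt
    · exact absurd (singleton_prefix_drop.mp hpre) (getElem?_lt_takeWhile_len cs k hlt)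
    · exact heq
    · exact absurd (singleton_prefix_drop.mpr (getElem?_at_takeWhile_len cs h)) (hmin t hgt)
  omega

-- take/drop at the takeWhile boundary are takeWhile/dropWhile
theorem str_ext {a b : String} (h : a.toList = b.toList) : a = b :=
  String.toList_injective h

theorem take_takeWhile_len (cs : List Char) (p : Char → Bool) :
    cs.take (cs.takeWhile p).length = cs.takeWhile p :=
  ((List.prefix_iff_eq_take).mp (List.takeWhile_prefix p)).symm

theorem drop_takeWhile_len (cs : List Char) (p : Char → Bool) :
    cs.drop (cs.takeWhile p).length = cs.dropWhile p := by
  nth_rewrite 2 [← List.takeWhile_append_dropWhile (p := p) (l := cs)]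
  exact List.drop_left

-- ===== VERDICT (by name: the statement is the Claim_ definition above) =====
theorem full_name_spec : Claim_equal_full_name := by
  intro arg _ hpre
  unfold Spec_full_name full_name full_name_alt
  have hmem : ' ' ∈ arg.toList := by
    unfold Pre_full_name at hpre
    rw [PySem.Str.isIn_iff_infix] at hpre
    obtain ⟨pre, suf, hps⟩ := hpre
    have : ' ' ∈ pre ++ " ".toList ++ suf := by simp
    rw [hps] at this
    exact this
  apply str_ext
  show (String.ofList (fnAgo [] arg.toList)).toList =
    (PySem.Str.upper (PySem.Str.slice arg none (some (PySem.Str.find arg " "))) ++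
      PySem.Str.slice arg (some (PySem.Str.find arg " ")) none).toList
  have hfind : PySem.Str.find arg " " = ((arg.toList.takeWhile (fun c => c != ' ')).length : Int) := by
    rw [PySem.Str.find_eq]
    have hsp : (" " : String).toList = [' '] := rfl
    rw [hsp]
    exact find_space arg.toList hmem
  rw [hfind]
  simp only [String.toList_append, PySem.Str.toList_upper, PySem.Str.toList_slice,
    PySem.Chars.slice_eq_listSlice, PySem.List.slice_to_natCast, PySem.List.slice_from_natCast]
  rw [fnAgo_eq arg.toList [] hmem, take_takeWhile_len, drop_takeWhile_len]
  simp [PySem.Chars.upper, String.toList_ofList]
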